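-- pv_equiv track=rewrite | github.com/jakoebl/Cube-Solver | generate_g1.py | coordinate
-- ===== SOURCE A (Python) =====
-- def coordinate(string):
--     exponent = 10
--     result = 0
--     for bit in string:
--         if bit == "1":
--             result += 2 ** exponent
--         exponent -= 1
--         if exponent == -1:
--             break
--     return result
-- ===== SOURCE B (Python) =====
-- def coordinate(string):
--     bits = "".join(c if c == "1" else "0" for c in string[:11]).ljust(11, "0")
--     return int(bits, 2)
-- ===== Notes on version B (the rewrite author's own statement) =====
-- stated objective: idiomatic
-- what changed: Instead of A's explicit loop summing 2**exponent with a decreasing counter and early break, B first builds a normalized 11-char binary string (sanitize non-'1' chars to '0', slice to 11, right-pad with '0') and then delegates the numeric conversion to the library parser int(bits, 2).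
import Mathlib
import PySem

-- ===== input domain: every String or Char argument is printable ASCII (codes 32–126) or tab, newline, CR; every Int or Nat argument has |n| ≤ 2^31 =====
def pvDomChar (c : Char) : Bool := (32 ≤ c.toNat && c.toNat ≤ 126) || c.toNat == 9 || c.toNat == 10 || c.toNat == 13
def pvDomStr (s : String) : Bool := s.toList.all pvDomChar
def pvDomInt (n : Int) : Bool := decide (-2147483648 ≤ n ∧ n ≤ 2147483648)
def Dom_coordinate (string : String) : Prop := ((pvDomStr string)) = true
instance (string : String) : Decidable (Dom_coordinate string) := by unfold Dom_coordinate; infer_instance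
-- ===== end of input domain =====

-- B replaces A's explicit decreasing-exponent 2**exponent summation (with early break) by
-- normalizing the input to an 11-char binary string and delegating to int(bits, 2) (idiomatic).


-- ===== PORT A =====
-- exponent stays an Int as in Python; it is only used as a power while ≥ 0 (the loop
-- breaks once it reaches -1), so `2 ^ exponent.toNat` is exact here.
def coordLoop : List Char → Int → Int → Int
  | [], _, result => result
  | bit :: rest, exponent, result =>
    let result := if bit == '1' then result + 2 ^ exponent.toNat else result
    let exponent := exponent - 1
    if exponent == -1 then result else coordLoop rest exponent result

def coordinate (string : String) : Int := coordLoop string.toList 10 0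

-- ===== PORT B =====
-- semantics of Python's int(s, 2) on a string of '0'/'1' digits (base-2 positional value);
-- exact here because bits below is always a nonempty all-'0'/'1' string
def parseBin2 (bits : List Char) : Int :=
  bits.foldl (fun r c => r * 2 + (if c == '1' then 1 else 0)) 0

-- bits = "".join(c if c == "1" else "0" for c in string[:11]).ljust(11, "0"); int(bits, 2)
def coordinate_alt (string : String) : Int :=
  let bits := (string.toList.take 11).map (fun c => if c == '1' then c else '0')
      ++ List.replicate (11 - string.toList.length) '0'
  parseBin2 bits

-- ===== PRECONDITION & SPEC =====
def Spec_coordinate (string : String) (out : Int) : Prop := out = coordinate_alt string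
instance (string : String) (out : Int) : Decidable (Spec_coordinate string out) := by unfold Spec_coordinate; infer_instance

-- ===== CLAIM (what is proved, stated in full; the proofs are below) =====
def Claim_equal_coordinate : Prop := ∀ (string : String), Dom_coordinate string → Spec_coordinate string (coordinate string)

-- ===== LEMMAS AND PROOFS =====

def binStep (r : Int) (c : Char) : Int := r * 2 + (if c == '1' then 1 else 0)

lemma parseBin2_eq_foldl (l : List Char) : parseBin2 l = l.foldl binStep 0 := rfl

lemma bin_shift (l : List Char) (a : Int) :
    l.foldl binStep a = a * 2 ^ l.length + l.foldl binStep 0 := by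
  induction l generalizing a with
  | nil => simp
  | cons c cs ih =>
    simp only [List.foldl_cons, List.length_cons]
    rw [ih (binStep a c), ih (binStep 0 c)]
    by_cases hc : c = '1' <;> simp [binStep, hc] <;> ring

-- sanitizing non-'1' chars to '0' does not change the parsed value
lemma bin_map_sanitize (l : List Char) (a : Int) :
    (l.map (fun c => if c == '1' then c else '0')).foldl binStep a = l.foldl binStep a := by
  induction l generalizing a with
  | nil => rfl
  | cons c cs ih =>
    have h1 : binStep a (if c == '1' then c else '0') = binStep a c := by
      by_cases hc : c = '1' <;> simp [hc, binStep]
    simp only [List.map_cons, List.foldl_cons, h1]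
    exact ih _

lemma pad_length' (n : Nat) (cs : List Char) :
    (cs.take n ++ List.replicate (n - cs.length) '0').length = n := by
  simp [List.length_take]; omega

lemma coordLoop_eq (e : Nat) (cs : List Char) (r : Int) :
    coordLoop cs (e : Int) r
      = r + (cs.take (e + 1) ++ List.replicate (e + 1 - cs.length) '0').foldl binStep 0 := by
  induction e generalizing cs r with
  | zero =>
    cases cs with
    | nil => simp [coordLoop, binStep]
    | cons c cs' =>
      simp only [coordLoop]
      norm_num
      by_cases hc : c = '1' <;> simp [hc, binStep]
  | succ e ih =>
    cases cs with
    | nil =>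
      simp only [coordLoop, List.take_nil, List.nil_append, List.length_nil, Nat.sub_zero]
      have : ∀ n : Nat, (List.replicate n '0').foldl binStep 0 = 0 := by
        intro n; induction n with
        | zero => simp
        | succ k ihk => simpa [List.replicate_succ, binStep] using ihk
      simp [this]
    | cons c cs' =>
      simp only [coordLoop]
      rw [show ((e + 1 : Nat) : Int) = (e : Int) + 1 by push_cast; ring]
      simp only [show (e : Int) + 1 - 1 = (e : Int) from by ring]
      rw [show ((e : Int) + 1).toNat = e + 1 from by omega]
      rw [if_neg (by simp)]
      rw [ih]
      have hlist : ((c :: cs').take (e + 1 + 1) ++ List.replicate (e + 1 + 1 - (c :: cs').length) '0')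
          = c :: (cs'.take (e + 1) ++ List.replicate (e + 1 - cs'.length) '0') := by
        simp [List.take_succ_cons, List.length_cons]
      rw [hlist]
      rw [List.foldl_cons, bin_shift _ (binStep 0 c), pad_length']
      by_cases hc : c = '1' <;> simp [hc, binStep] <;> ring

-- the map-then-pad list of B parses to the same value as the take-then-pad list
lemma alt_eq (s : String) :
    coordinate_alt s
      = (s.toList.take 11 ++ List.replicate (11 - s.toList.length) '0').foldl binStep 0 := by
  unfold coordinate_alt
  rw [parseBin2_eq_foldl, List.foldl_append, List.foldl_append, bin_map_sanitize]

-- ===== VERDICT (by name: the statement is the Claim_ definition above) =====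
theorem coordinate_spec : Claim_equal_coordinate := by
  intro s _
  unfold Spec_coordinate coordinate
  rw [alt_eq]
  have := coordLoop_eq 10 s.toList 0
  norm_num at this ⊢
  exact this
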